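-- pv_equiv track=rewrite | github.com/pypi-data/pypi-mirror-39 | packages/xfunctions/xfunctions-0.1.14.tar.gz/xfunctions-0.1.14/xfunctions/xfunctions.py | x_mix
-- ===== SOURCE A (Python) =====
-- def x_mix(list_in_list, i=1, target=None):
--     # results with '|||'
--     ss = []
--
--     if 1 > len(list_in_list):
--         return ss
--
--     if 1 == len(list_in_list):
--         return list_in_list[0]
--
--     if target is None:
--         target = list_in_list[0]
--
--     for s in target:
--         for e in list_in_list[i]:
--             if not e.strip():
--                 r = e
--             else:
--                 r = '%s|||%s' % (s, e)
--
--             if r not in ss: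
--                 ss.append(r)
--
--     if i < len(list_in_list) - 1:
--         return x_mix(list_in_list, i=i + 1, target=ss)
--
--     # results without '|||'
--     results = []
--     for row in ss:
--         results.append(row.split('|||'))
--
--     return results
-- ===== SOURCE B (Python) =====
-- def x_mix(list_in_list, i=1, target=None):
--     # Iterative sweep over the levels instead of tail recursion; dedup via a
--     # hash set kept alongside the ordered list instead of scanning the list.
--     n = len(list_in_list)
--     if n == 0:
--         return []
--     if n == 1:
--         return list_in_list[0]
--     if target is None:
--         target = list_in_list[0]
--     for j in range(i, n):
--         ss = []
--         seen = set()
--         for s in target: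
--             for e in list_in_list[j]:
--                 r = e if not e.strip() else '%s|||%s' % (s, e)
--                 if r not in seen:
--                     seen.add(r)
--                     ss.append(r)
--         target = ss
--     return [row.split('|||') for row in target]
-- ===== Notes on version B (the rewrite author's own statement) =====
-- stated objective: alternative
-- what changed: Replaces the tail recursion over levels by an explicit iterative sweep (for j in range(i, n)) and replaces the O(|ss|) 'r not in ss' list scan by a hash-set membership kept alongside the ordered list.
-- outside the precondition, e.g. on x_mix([['a', 'b']], 1, None): A returns ['a', 'b'], B returns ['a', 'b']; on x_mix([['a'], ['b']], 5, None): A raises IndexError, B returns [['a']]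
import Mathlib
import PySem

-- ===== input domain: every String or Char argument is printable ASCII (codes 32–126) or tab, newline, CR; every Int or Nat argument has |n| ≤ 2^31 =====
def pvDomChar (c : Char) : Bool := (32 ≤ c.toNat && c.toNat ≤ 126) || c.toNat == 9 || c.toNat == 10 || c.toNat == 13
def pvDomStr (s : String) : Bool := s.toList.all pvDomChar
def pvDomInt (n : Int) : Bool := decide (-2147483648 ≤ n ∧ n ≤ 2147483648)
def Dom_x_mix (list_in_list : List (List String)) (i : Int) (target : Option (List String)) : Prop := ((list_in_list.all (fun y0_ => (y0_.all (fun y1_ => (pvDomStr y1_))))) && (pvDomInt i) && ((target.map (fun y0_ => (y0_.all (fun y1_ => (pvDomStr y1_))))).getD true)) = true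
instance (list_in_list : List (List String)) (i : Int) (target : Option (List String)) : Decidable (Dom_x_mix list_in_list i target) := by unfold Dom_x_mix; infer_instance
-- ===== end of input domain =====

-- B replaces A's tail recursion over levels by an iterative range loop and the O(|ss|)
-- 'r not in ss' list scan by a hash-set membership; return values only are compared.

-- shared by both Pythons: r = e if not e.strip() else '%s|||%s' % (s, e)
def pvJoin (s e : String) : String :=
  if PySem.Str.strip e = "" then e else s ++ "|||" ++ e

-- row.split('|||')  (sep is the non-empty literal, so split? is always some)
def pvSplit (row : String) : List String := (PySem.Str.split? row "|||").getD []

-- ===== PORT A =====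
-- A's inner body: if r not in ss: ss.append(r)
def pvStepA (s : String) (ss : List String) (e : String) : List String :=
  if pvJoin s e ∈ ss then ss else ss ++ [pvJoin s e]

-- A's double loop building ss from target and one level
def pvCrossA (tgt lvl : List String) : List String :=
  tgt.foldl (fun ss s => lvl.foldl (pvStepA s) ss) []

def x_mix (list_in_list : List (List String)) (i : Int) (target : Option (List String)) : List (List String) :=
  if list_in_list.length < 1 then []
  else if list_in_list.length = 1 then
    []  -- Python returns the flat list list_in_list[0] (a list[str], not list[list[str]]); excluded by Pre_
  else
    let tgt := target.getD (list_in_list.headD [])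
    match PySem.List.pyGet? list_in_list i with
    | none => []  -- IndexError in Python; excluded by Pre_
    | some lvl =>
      let ss := pvCrossA tgt lvl
      if i < (list_in_list.length : Int) - 1 then
        x_mix list_in_list (i + 1) (some ss)
      else
        ss.map pvSplit
termination_by ((list_in_list.length : Int) - 1 - i).toNat
decreasing_by omega

-- ===== PORT B =====
-- B's inner body: seen-set membership, append to both
def pvStepB (s : String) (p : List String × PySem.Set String) (e : String) :
    List String × PySem.Set String :=
  if PySem.Set.contains p.2 (pvJoin s e) then p
  else (p.1 ++ [pvJoin s e], PySem.Set.add p.2 (pvJoin s e))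

-- B's double loop: ordered list plus seen-set, project the list
def pvCrossB (tgt lvl : List String) : List String :=
  (tgt.foldl (fun p s => lvl.foldl (pvStepB s) p) ([], PySem.Set.empty)).1

def x_mix_alt (list_in_list : List (List String)) (i : Int) (target : Option (List String)) : List (List String) :=
  if list_in_list.length = 0 then []
  else if list_in_list.length = 1 then
    []  -- same untypeable flat-list corner as A; excluded by Pre_
  else
    let t0 := target.getD (list_in_list.headD [])
    let fin := (PySem.List.pyRange i (list_in_list.length : Int) 1).foldl
      (fun tgt j => pvCrossB tgt ((PySem.List.pyGet? list_in_list j).getD [])) t0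
    fin.map pvSplit

-- ===== PRECONDITION & SPEC =====
-- Pre_ excludes (a) length-1 inputs, where A returns the flat inner list — a list[str],
-- not representable as List (List String) — and (b) out-of-range i for length ≥ 2,
-- where A raises IndexError on list_in_list[i].
def Pre_x_mix (list_in_list : List (List String)) (i : Int) (target : Option (List String)) : Prop :=
  list_in_list.length = 0 ∨
    (2 ≤ list_in_list.length ∧ -(list_in_list.length : Int) ≤ i ∧ i < (list_in_list.length : Int))
instance (list_in_list : List (List String)) (i : Int) (target : Option (List String)) : Decidable (Pre_x_mix list_in_list i target) := by unfold Pre_x_mix; infer_instance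

def pvWitness_x_mix : List (List String) × Int × Option (List String) := ([["a"], ["b", "c"]], 1, none)

def Spec_x_mix (list_in_list : List (List String)) (i : Int) (target : Option (List String)) (out : List (List String)) : Prop := out = x_mix_alt list_in_list i target
instance (list_in_list : List (List String)) (i : Int) (target : Option (List String)) (out : List (List String)) : Decidable (Spec_x_mix list_in_list i target out) := by unfold Spec_x_mix; infer_instance

-- ===== CLAIM (what is proved, stated in full; the proofs are below) =====
def Claim_equal_x_mix : Prop := ∀ (list_in_list : List (List String)) (i : Int) (target : Option (List String)), Dom_x_mix list_in_list i target → Pre_x_mix list_in_list i target → Spec_x_mix list_in_list i target (x_mix list_in_list i target)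

-- ===== LEMMAS AND PROOFS =====

-- folding a pair-step that acts diagonally equals folding the list-step, twice over
lemma foldl_diag {α γ : Type} (g : γ × γ → α → γ × γ) (f : γ → α → γ)
    (h : ∀ a x, g (a, a) x = (f a x, f a x)) :
    ∀ (l : List α) (a : γ), l.foldl g (a, a) = (l.foldl f a, l.foldl f a) := by
  intro l
  induction l with
  | nil => intro a; rfl
  | cons x xs ih => intro a; simp only [List.foldl_cons, h]; exact ih (f a x)

lemma stepB_diag (s ss e) : pvStepB s (ss, ss) e = (pvStepA s ss e, pvStepA s ss e) := by
  simp only [pvStepB, pvStepA, PySem.Set.contains, PySem.Set.add, List.contains_iff_mem]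
  by_cases h : pvJoin s e ∈ ss <;> simp [h]

lemma crossB_eq_crossA : pvCrossB = pvCrossA := by
  funext tgt lvl
  unfold pvCrossB pvCrossA
  have h : ∀ (a : List String) (s : String),
      lvl.foldl (pvStepB s) (a, a) = (lvl.foldl (pvStepA s) a, lvl.foldl (pvStepA s) a) :=
    fun a s => foldl_diag (pvStepB s) (pvStepA s) (stepB_diag s) lvl a
  have : tgt.foldl (fun p s => lvl.foldl (pvStepB s) p)
      (([] : List String), ([] : List String)) =
      (tgt.foldl (fun ss s => lvl.foldl (pvStepA s) ss) [],
       tgt.foldl (fun ss s => lvl.foldl (pvStepA s) ss) []) :=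
    foldl_diag _ _ (fun a s => h a s) tgt []
  simpa [PySem.Set.empty] using congrArg Prod.fst this

-- A's recursion over levels i, i+1, …, n-1 is the fold of pvCrossA over range(i, n)
lemma x_mix_eq_fold (L : List (List String)) (h2 : 2 ≤ L.length) :
    ∀ (k : Nat) (i : Int) (o : Option (List String)),
      (((L.length : Int) - 1 - i).toNat = k) → -(L.length : Int) ≤ i → i < (L.length : Int) →
      x_mix L i o =
        ((PySem.List.pyRange i (L.length : Int) 1).foldl
          (fun tgt j => pvCrossA tgt ((PySem.List.pyGet? L j).getD []))
          (o.getD (L.headD []))).map pvSplit := by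
  intro k
  induction k with
  | zero =>
    intro i o hk hlo hhi
    have hi : i = (L.length : Int) - 1 := by omega
    obtain ⟨lvl, hlvl⟩ : ∃ lvl, PySem.List.pyGet? L i = some lvl := by
      cases hget : PySem.List.pyGet? L i with
      | none =>
        exact absurd ((PySem.List.pyGet?_eq_none_iff L i).mp hget)
          (by simp [PySem.Raise.InRange]; omega)
      | some lvl => exact ⟨lvl, rfl⟩
    rw [x_mix]
    have h1 : ¬ L.length < 1 := by omega
    have h1' : ¬ L.length = 1 := by omega
    have hrec : ¬ i < (L.length : Int) - 1 := by omega
    simp only [h1, h1', if_false, hlvl, hrec]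
    rw [hi, PySem.List.pyRange_one_cons (by omega),
        PySem.List.pyRange_one_eq_nil (by omega)]
    simp [hi ▸ hlvl]
  | succ k ih =>
    intro i o hk hlo hhi
    have hrec : i < (L.length : Int) - 1 := by omega
    obtain ⟨lvl, hlvl⟩ : ∃ lvl, PySem.List.pyGet? L i = some lvl := by
      cases hget : PySem.List.pyGet? L i with
      | none =>
        exact absurd ((PySem.List.pyGet?_eq_none_iff L i).mp hget)
          (by simp [PySem.Raise.InRange]; omega)
      | some lvl => exact ⟨lvl, rfl⟩
    rw [x_mix]
    have h1 : ¬ L.length < 1 := by omega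
    have h1' : ¬ L.length = 1 := by omega
    simp only [h1, h1', if_false, hlvl, hrec, if_true]
    rw [ih (i + 1) (some (pvCrossA (o.getD (L.headD [])) lvl)) (by omega) (by omega) (by omega)]
    conv_rhs => rw [PySem.List.pyRange_one_cons (show i < (L.length : Int) by omega)]
    simp [hlvl]

-- ===== VERDICT (by name: the statement is the Claim_ definition above) =====
theorem x_mix_spec : Claim_equal_x_mix := by
  intro L i target _ hpre
  unfold Spec_x_mix
  rcases hpre with h0 | ⟨h2, hlo, hhi⟩
  · rw [x_mix, x_mix_alt]
    simp [h0]
  · rw [x_mix_eq_fold L h2 (((L.length : Int) - 1 - i).toNat) i target rfl hlo hhi]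
    unfold x_mix_alt
    have h1 : ¬ L.length = 0 := by omega
    have h1' : ¬ L.length = 1 := by omega
    simp only [h1, h1', if_false, crossB_eq_crossA]
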